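-- pv_equiv track=rewrite | github.com/paf0186/llm_code_and_review_tools | gerrit_comments/gerrit_comments/reintegration.py | _find_descendants
-- ===== SOURCE A (Python) =====
-- def _find_descendants(
--
--     stale_change: int,
--     series_patches: list[dict],
-- ) -> list[int]:
--     """Find all descendants of a stale change in the series.
--
--     In a base-to-tip ordered list, descendants are all patches
--     after the stale one.
--     """
--     stale_idx = None
--     for idx, p in enumerate(series_patches):
--         cn = p.get('change_number') or p.change_number
--         if cn == stale_change:
--             stale_idx = idx
--             break
--
--     if stale_idx is None:
--         return []
--
--     # Descendants are indices > stale_idx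
--     descendants = []
--     for i in range(stale_idx + 1, len(series_patches)):
--         p = series_patches[i]
--         cn = p.get('change_number') if isinstance(p, dict) else p.change_number
--         descendants.append(cn)
--
--     return descendants
-- ===== SOURCE B (Python) =====
-- def _find_descendants(
--     stale_change: int,
--     series_patches: list[dict],
-- ) -> list[int]:
--     """Find all descendants of a stale change in the series (single pass)."""
--     found = False
--     descendants = []
--     for p in series_patches:
--         if found:
--             cn = p.get('change_number') if isinstance(p, dict) else p.change_number
--             descendants.append(cn)
--         else:
--             cn = p.get('change_number') or p.change_number
--             if cn == stale_change:
--                 found = True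
--     return descendants
-- ===== Notes on version B (the rewrite author's own statement) =====
-- stated objective: alternative
-- what changed: Replaces A's two-pass find-index-then-collect-by-range-indexing with one linear traversal maintaining a 'found' flag and an accumulator, keeping both of A's distinct key-extraction expressions.
import Mathlib
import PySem

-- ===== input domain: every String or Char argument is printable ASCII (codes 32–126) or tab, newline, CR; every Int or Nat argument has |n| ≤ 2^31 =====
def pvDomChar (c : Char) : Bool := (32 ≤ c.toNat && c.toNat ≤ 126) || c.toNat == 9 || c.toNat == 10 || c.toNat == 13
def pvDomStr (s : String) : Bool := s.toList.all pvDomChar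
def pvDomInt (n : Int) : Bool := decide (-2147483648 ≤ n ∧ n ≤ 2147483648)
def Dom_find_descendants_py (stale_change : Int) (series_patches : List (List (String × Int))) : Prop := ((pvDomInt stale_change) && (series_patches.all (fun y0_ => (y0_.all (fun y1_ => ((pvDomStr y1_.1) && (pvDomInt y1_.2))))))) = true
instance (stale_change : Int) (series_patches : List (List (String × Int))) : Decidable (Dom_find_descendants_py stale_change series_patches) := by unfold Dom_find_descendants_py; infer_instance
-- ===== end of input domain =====

-- B replaces A's two-pass find-index-then-range-indexed-collect with one linear pass
-- keeping a 'found' flag and an accumulator; same O(n) cost, proved equal on Pre_.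


-- ===== PORT A =====
-- Looked-up change number of one patch dict (shared helper).
-- In Python, a missing or falsy (zero) 'change_number' falls through to `p.change_number`,
-- which RAISES AttributeError on a dict; those inputs are excluded by Pre_ below, so the
-- `.getD 0` default is never the value used on admitted inputs.
def pvCn (p : List (String × Int)) : Int :=
  ((PySem.Dict.mk p).get? "change_number").getD 0

-- first loop of A: scan with enumerate, break at the first cn == stale_change
def pvFindStale (stale_change : Int) : List (List (String × Int)) → Nat → Option Nat
  | [], _ => none
  | p :: rest, idx =>
      if pvCn p = stale_change then some idx
      else pvFindStale stale_change rest (idx + 1)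

-- second loop of A: `for i in range(stale_idx + 1, len(series_patches))`, indexing sp[i]
def pvCollect (sp : List (List (String × Int))) (i : Nat) : List Int :=
  if h : i < sp.length then pvCn sp[i] :: pvCollect sp (i + 1)
  else []
  termination_by sp.length - i

def find_descendants_py (stale_change : Int) (series_patches : List (List (String × Int))) : List Int :=
  match pvFindStale stale_change series_patches 0 with
  | none => []
  | some stale_idx => pvCollect series_patches (stale_idx + 1)

-- ===== PORT B =====
-- single pass with a found-flag and accumulator (Source B)
def pvBLoop (stale_change : Int) : List (List (String × Int)) → Bool → List Int → List Int
  | [], _, acc => acc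
  | p :: rest, found, acc =>
      if found then pvBLoop stale_change rest true (acc ++ [pvCn p])
      else pvBLoop stale_change rest (pvCn p == stale_change) acc

def find_descendants_py_alt (stale_change : Int) (series_patches : List (List (String × Int))) : List Int :=
  pvBLoop stale_change series_patches false []

-- ===== PRECONDITION & SPEC =====
-- Pre_ excludes exactly the inputs where the Python A does not return a list of ints:
-- a missing or zero 'change_number' at or before the first match makes the `or` fallback
-- raise AttributeError, and a missing key after the match puts None in the result.
def Pre_find_descendants_py (stale_change : Int) (series_patches : List (List (String × Int))) : Prop :=
  ∀ i : Fin series_patches.length,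
    ((∀ j : Fin series_patches.length, j.val < i.val →
        (PySem.Dict.mk series_patches[j]).get? "change_number" ≠ some stale_change) →
      ((PySem.Dict.mk series_patches[i]).get? "change_number" ≠ none ∧
       (PySem.Dict.mk series_patches[i]).get? "change_number" ≠ some 0)) ∧
    ((∃ j : Fin series_patches.length, j.val < i.val ∧
        (PySem.Dict.mk series_patches[j]).get? "change_number" = some stale_change) →
      (PySem.Dict.mk series_patches[i]).get? "change_number" ≠ none)

instance (stale_change : Int) (series_patches : List (List (String × Int))) : Decidable (Pre_find_descendants_py stale_change series_patches) := by unfold Pre_find_descendants_py; infer_instance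

def pvWitness_find_descendants_py : Int × (List (List (String × Int))) :=
  (5, [[("change_number", 5)], [("change_number", 7)], [("change_number", 9)]])

def Spec_find_descendants_py (stale_change : Int) (series_patches : List (List (String × Int))) (out : List Int) : Prop := out = find_descendants_py_alt stale_change series_patches
instance (stale_change : Int) (series_patches : List (List (String × Int))) (out : List Int) : Decidable (Spec_find_descendants_py stale_change series_patches out) := by unfold Spec_find_descendants_py; infer_instance

-- ===== CLAIM (what is proved, stated in full; the proofs are below) =====
def Claim_equal_find_descendants_py : Prop := ∀ (stale_change : Int) (series_patches : List (List (String × Int))), Dom_find_descendants_py stale_change series_patches → Pre_find_descendants_py stale_change series_patches → Spec_find_descendants_py stale_change series_patches (find_descendants_py stale_change series_patches)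

-- ===== LEMMAS AND PROOFS =====

theorem pvCollect_eq_drop (sp : List (List (String × Int))) (i : Nat) :
    pvCollect sp i = (sp.drop i).map pvCn := by
  by_cases h : i < sp.length
  · rw [pvCollect, dif_pos h, pvCollect_eq_drop sp (i + 1),
      List.drop_eq_getElem_cons h, List.map_cons]
  · rw [pvCollect, dif_neg h]
    rw [List.drop_of_length_le (by omega)]
    simp
  termination_by sp.length - i

theorem pvBLoop_found (stale_change : Int) (sp : List (List (String × Int)))
    (acc : List Int) : pvBLoop stale_change sp true acc = acc ++ sp.map pvCn := by
  induction sp generalizing acc with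
  | nil => simp [pvBLoop]
  | cons p rest ih => simp [pvBLoop, ih]

theorem pvFindStale_shift (stale_change : Int) (sp : List (List (String × Int))) (n : Nat) :
    pvFindStale stale_change sp n = (pvFindStale stale_change sp 0).map (· + n) := by
  induction sp generalizing n with
  | nil => simp [pvFindStale]
  | cons p rest ih =>
    by_cases h : pvCn p = stale_change
    · simp [pvFindStale, h]
    · rw [pvFindStale, if_neg h, pvFindStale, if_neg h, ih (n + 1), ih 1]
      cases pvFindStale stale_change rest 0 <;> simp <;> omega

theorem pvMain (stale_change : Int) (sp : List (List (String × Int))) :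
    find_descendants_py stale_change sp = find_descendants_py_alt stale_change sp := by
  unfold find_descendants_py find_descendants_py_alt
  induction sp with
  | nil => simp [pvFindStale, pvBLoop]
  | cons p rest ih =>
    by_cases h : pvCn p = stale_change
    · have hb : (pvCn p == stale_change) = true := by simp [h]
      simp only [pvFindStale, pvBLoop, if_pos h, hb, Bool.false_eq_true, if_false]
      rw [pvBLoop_found, pvCollect_eq_drop]
      simp
    · have hb : (pvCn p == stale_change) = false := by simp [h]
      simp only [pvFindStale, pvBLoop, if_neg h, hb, Bool.false_eq_true, if_false,
        pvFindStale_shift stale_change rest 1]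
      cases hf : pvFindStale stale_change rest 0 with
      | none => simpa [hf] using ih
      | some idx =>
        rw [hf] at ih
        simp only [pvCollect_eq_drop] at ih
        simp only [Option.map_some, pvCollect_eq_drop, List.drop_succ_cons]
        simpa using ih

-- ===== VERDICT (by name: the statement is the Claim_ definition above) =====
theorem find_descendants_py_spec : Claim_equal_find_descendants_py := by
  intro sc sp _ _
  unfold Spec_find_descendants_py
  exact pvMain sc sp
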